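-- pv_equiv track=rewrite | github.com/joshuahvs/DDP1 | latihan UAS/soal latihan UAS.py | kata_palindrom
-- ===== SOURCE A (Python) =====
-- def per_kata(word):
--     if len(word) == 1 or len(word) == 0:
--         return True
--     else:
--         if word[0] == word[-1]:
--             return per_kata(word[1:-1])
--         else:
--             return False
--
-- def kata_palindrom(lst):
--     if lst == []:
--         return 0
--     else:
--         if per_kata(lst[0]):
--             return 1 + kata_palindrom(lst[1:])
--         else:
--             return kata_palindrom(lst[1:])
-- ===== SOURCE B (Python) =====
-- def kata_palindrom(lst):
--     return sum(1 for s in lst if s == s[::-1])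
-- ===== Notes on version B (the rewrite author's own statement) =====
-- stated objective: faster
-- what changed: Replaces the double recursion (recursive end-peeling palindrome check on quadratically many slices, plus recursion with list slicing over the list) by a single pass that compares each string with its reversal.
import Mathlib
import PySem

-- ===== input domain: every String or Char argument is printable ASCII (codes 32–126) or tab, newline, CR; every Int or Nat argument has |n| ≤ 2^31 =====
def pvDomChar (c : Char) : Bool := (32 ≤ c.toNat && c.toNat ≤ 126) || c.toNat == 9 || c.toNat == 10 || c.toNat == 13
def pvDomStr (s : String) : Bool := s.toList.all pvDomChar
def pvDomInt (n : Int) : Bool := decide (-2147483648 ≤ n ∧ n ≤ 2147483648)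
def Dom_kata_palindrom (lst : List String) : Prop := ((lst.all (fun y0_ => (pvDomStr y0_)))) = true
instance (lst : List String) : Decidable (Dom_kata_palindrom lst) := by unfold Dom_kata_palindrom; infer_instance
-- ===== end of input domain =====

-- B replaces A's recursive end-peeling (with quadratic slicing) by one pass comparing each string with its reversal; measured asymptotically faster.

-- ===== PORT A =====
-- per_kata, on the string's character list; word[1:-1] is PySem.List.slice.
def per_kata (w : List Char) : Bool :=
  if w.length = 1 ∨ w.length = 0 then true
  else
    if PySem.List.pyGet? w 0 = PySem.List.pyGet? w (-1) then
      per_kata (PySem.List.slice w (some 1) (some (-1)))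
    else false
termination_by w.length
decreasing_by
  simp only [PySem.List.length_slice, PySem.List.clampIdx_neg_one]
  omega

def kata_palindrom (lst : List String) : Int :=
  match lst with
  | [] => 0
  | s :: rest =>
      if per_kata s.toList then 1 + kata_palindrom rest
      else kata_palindrom rest

-- ===== PORT B =====
-- sum(1 for s in lst if s == s[::-1]) as a left fold; s == s[::-1] is reversal comparison.
def kata_palindrom_alt (lst : List String) : Int :=
  lst.foldl (fun acc s => if s.toList = s.toList.reverse then acc + 1 else acc) 0

-- ===== PRECONDITION & SPEC =====
def Spec_kata_palindrom (lst : List String) (out : Int) : Prop := out = kata_palindrom_alt lst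
instance (lst : List String) (out : Int) : Decidable (Spec_kata_palindrom lst out) := by unfold Spec_kata_palindrom; infer_instance

-- ===== CLAIM (what is proved, stated in full; the proofs are below) =====
def Claim_equal_kata_palindrom : Prop := ∀ (lst : List String), Dom_kata_palindrom lst → Spec_kata_palindrom lst (kata_palindrom lst)

-- ===== LEMMAS AND PROOFS =====


lemma slice_one_neg_one (xs : List Char) :
    PySem.List.slice xs (some 1) (some (-1)) = xs.tail.dropLast := by
  cases xs with
  | nil => simp [PySem.List.slice, PySem.List.clampIdx]
  | cons a t =>
      simp [PySem.List.slice, PySem.List.clampIdx, List.dropLast_eq_take]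
      have h0 : ¬((t.length : Int) < 0) := by omega
      rw [if_neg h0]
      omega

lemma pal_iff (a b : Char) (mid : List Char) :
    ((a :: mid) ++ [b] = ((a :: mid) ++ [b]).reverse) ↔ (a = b ∧ mid = mid.reverse) := by
  constructor
  · intro h
    have h' : a :: (mid ++ [b]) = b :: (mid.reverse ++ [a]) := by
      simpa [List.reverse_append] using h
    obtain ⟨h1, h2⟩ := List.cons.inj h'
    subst h1
    refine ⟨rfl, ?_⟩
    simpa using h2
  · rintro ⟨rfl, hm⟩
    simp [List.reverse_append]
    exact hm

lemma per_kata_aux : ∀ (n : Nat) (w : List Char), w.length ≤ n →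
    per_kata w = decide (w = w.reverse) := by
  intro n
  induction n with
  | zero =>
      intro w h
      have hw : w = [] := by cases w <;> simp_all
      subst hw; simp [per_kata]
  | succ n ih =>
      intro w h
      by_cases h1 : w.length = 1 ∨ w.length = 0
      · rcases h1 with h1 | h1
        · obtain ⟨a, rfl⟩ : ∃ a, w = [a] := by
            cases w with
            | nil => simp at h1
            | cons a t => cases t with
              | nil => exact ⟨a, rfl⟩
              | cons b u => simp at h1
          simp [per_kata]
        · have hw : w = [] := List.length_eq_zero_iff.mp h1
          subst hw; simp [per_kata]
      · push Not at h1
        obtain ⟨a, t, rfl⟩ : ∃ a t, w = a :: t := by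
          cases w with
          | nil => simp at h1
          | cons a t => exact ⟨a, t, rfl⟩
        have ht : t ≠ [] := by
          intro e; subst e; simp at h1
        obtain ⟨mid, b, hw⟩ : ∃ mid b, a :: t = (a :: mid) ++ [b] :=
          ⟨t.dropLast, t.getLast ht, by
            rw [List.cons_append, List.dropLast_append_getLast ht]⟩
        have hlen : mid.length + 2 = t.length + 1 := by
          have h' := congrArg List.length hw; simp at h'; omega
        rw [hw]
        rw [per_kata]
        rw [if_neg (by simp only [List.length_append, List.length_cons, List.length_nil]; omega)]
        rw [PySem.List.pyGet?_neg_one_append_singleton]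
        have hget0 : PySem.List.pyGet? ((a :: mid) ++ [b]) 0 = some a := by
          simp [PySem.List.pyGet?_zero]
        rw [hget0]
        rw [slice_one_neg_one]
        have hmid : ((a :: mid) ++ [b]).tail.dropLast = mid := by
          simp
        rw [hmid]
        have hrec : per_kata mid = decide (mid = mid.reverse) := by
          apply ih
          have : (a :: t).length ≤ n + 1 := h
          simp at this
          omega
        by_cases hab : a = b
        · rw [if_pos (by rw [hab])]
          rw [hrec]
          exact decide_eq_decide.mpr
            ⟨fun hm => (pal_iff a b mid).mpr ⟨hab, hm⟩,
             fun hwp => ((pal_iff a b mid).mp hwp).2⟩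
        · rw [if_neg (by simpa using hab)]
          exact (decide_eq_false
            (fun hwp => hab ((pal_iff a b mid).mp hwp).1)).symm

lemma per_kata_eq_pal (w : List Char) : per_kata w = decide (w = w.reverse) :=
  per_kata_aux w.length w le_rfl

lemma foldl_count (lst : List String) (acc : Int) :
    lst.foldl (fun acc s => if s.toList = s.toList.reverse then acc + 1 else acc) acc
      = acc + kata_palindrom lst := by
  induction lst generalizing acc with
  | nil => simp [kata_palindrom]
  | cons s rest ih =>
      simp only [List.foldl_cons, kata_palindrom, per_kata_eq_pal]
      by_cases hp : s.toList = s.toList.reverse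
      · rw [if_pos hp, ih, if_pos (by simpa using hp)]; ring
      · rw [if_neg hp, ih, if_neg (by simpa using hp)]

-- ===== VERDICT (by name: the statement is the Claim_ definition above) =====
theorem kata_palindrom_spec : Claim_equal_kata_palindrom := by
  intro lst _
  unfold Spec_kata_palindrom kata_palindrom_alt
  rw [foldl_count]; ring
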